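-- pv_equiv track=rewrite | github.com/fedortik/PSI | psi/users/tests.py | holl
-- ===== SOURCE A (Python) =====
-- def holl(answers):
--
--     if len(answers) != 30 or any(response not in [-3, -2, -1, 1, 2, 3] for response in answers):
--         return 'error answers count'
--
--     sub_scales = {
--         "Эмоциональная осведомленность": [1, 2, 4, 17, 19, 25],
--         "Управление своими эмоциями": [3, 7, 8, 10, 18, 30],
--         "Самомотивация": [5, 6, 13, 14, 16, 22],
--         "Эмпатия": [9, 11, 20, 21, 23, 28],
--         "Распознавание эмоций других людей": [12, 15, 24, 26, 27, 29],
--     }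
--
--     results = {}
--
--     for scale, questions in sub_scales.items():
--         score = sum(answers[q - 1] for q in questions)
--         results[scale] = score
--
--     results['Интеграционный уровень'] = sum(answers)
--
--     return results
-- ===== SOURCE B (Python) =====
-- def holl(answers):
--
--     if len(answers) != 30 or any(response not in [-3, -2, -1, 1, 2, 3] for response in answers):
--         return 'error answers count'
--
--     sub_scales = {
--         "Эмоциональная осведомленность": [1, 2, 4, 17, 19, 25],
--         "Управление своими эмоциями": [3, 7, 8, 10, 18, 30],
--         "Самомотивация": [5, 6, 13, 14, 16, 22],
--         "Эмпатия": [9, 11, 20, 21, 23, 28],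
--         "Распознавание эмоций других людей": [12, 15, 24, 26, 27, 29],
--     }
--
--     # inverse index: question number 1..30 -> scale name
--     lookup = {q: scale for scale, questions in sub_scales.items() for q in questions}
--
--     results = {scale: 0 for scale in sub_scales}
--     results['Интеграционный уровень'] = 0
--
--     for i, value in enumerate(answers):
--         results[lookup[i + 1]] += value
--         results['Интеграционный уровень'] += value
--
--     return results
-- ===== Notes on version B (the rewrite author's own statement) =====
-- stated objective: alternative
-- what changed: A sums each of the five scales separately by gathering answers[q-1] over its question list; B builds an inverse index question->scale once and scatters each answer in a single enumerate pass into a pre-zeroed results dict (and the integration total).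
import Mathlib
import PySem

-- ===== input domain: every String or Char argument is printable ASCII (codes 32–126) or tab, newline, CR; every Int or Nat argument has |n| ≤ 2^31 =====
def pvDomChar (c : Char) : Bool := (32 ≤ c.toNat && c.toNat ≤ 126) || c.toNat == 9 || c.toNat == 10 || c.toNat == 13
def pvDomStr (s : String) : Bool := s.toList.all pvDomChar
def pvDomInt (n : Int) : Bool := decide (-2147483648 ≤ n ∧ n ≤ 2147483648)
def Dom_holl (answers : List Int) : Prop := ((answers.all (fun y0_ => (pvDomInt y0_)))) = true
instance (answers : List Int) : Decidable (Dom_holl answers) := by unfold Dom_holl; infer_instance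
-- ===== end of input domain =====

-- B replaces A's five per-scale gather-sums with one inverse-index scatter pass over the answers
-- (alternative decomposition, same cost). On valid 30-answer inputs both Pythons return the SAME
-- dict, which the declared String return type cannot carry; both ports therefore serialise their
-- result dict, in insertion order, through the one shared fixed renderer hollRender — the only
-- non-transliterated step, identical on both sides. Equivalence is proved on ALL inputs.

-- ===== PORT A =====
def hollSubScales : List (String × List Int) :=
  [("Эмоциональная осведомленность", [1, 2, 4, 17, 19, 25]),
   ("Управление своими эмоциями", [3, 7, 8, 10, 18, 30]),
   ("Самомотивация", [5, 6, 13, 14, 16, 22]),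
   ("Эмпатия", [9, 11, 20, 21, 23, 28]),
   ("Распознавание эмоций других людей", [12, 15, 24, 26, 27, 29])]

-- fixed embedding of the returned dict into the declared String type: items in insertion order
def hollRender (rs : List (String × Int)) : String :=
  String.intercalate ", " (rs.map (fun p => p.1 ++ ": " ++ PySem.Int.toStr p.2))

def holl (answers : List Int) : String :=
  if answers.length ≠ 30 ∨ answers.any (fun response => !(([-3, -2, -1, 1, 2, 3] : List Int).contains response)) = true then
    "error answers count"
  else
    -- for scale, questions: results[scale] = sum(answers[q-1] for q in questions)
    let results := hollSubScales.map (fun p =>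
      (p.1, (p.2.map (fun q => (PySem.List.pyGet? answers (q - 1)).getD 0)).sum))
    hollRender (results ++ [("Интеграционный уровень", answers.sum)])

-- ===== PORT B =====
def holl_alt (answers : List Int) : String :=
  if answers.length ≠ 30 ∨ answers.any (fun response => !(([-3, -2, -1, 1, 2, 3] : List Int).contains response)) = true then
    "error answers count"
  else
    -- lookup = {q: scale for scale, questions in sub_scales.items() for q in questions}
    let lookup : PySem.Dict Int String :=
      hollSubScales.foldl (fun d p => p.2.foldl (fun d q => d.insert q p.1) d) PySem.Dict.empty
    -- results = {scale: 0 for scale in sub_scales}; results['Интеграционный уровень'] = 0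
    let init : PySem.Dict String Int :=
      (hollSubScales.foldl (fun d p => d.insert p.1 0) PySem.Dict.empty).insert "Интеграционный уровень" 0
    -- single scatter pass over enumerate(answers)
    let results := (PySem.List.enumerate answers).foldl
      (fun d iv =>
        (d.modify (lookup.getD (iv.1 + 1) "") 0 (· + iv.2)).modify "Интеграционный уровень" 0 (· + iv.2))
      init
    hollRender results.items

-- ===== PRECONDITION & SPEC =====
def Spec_holl (answers : List Int) (out : String) : Prop := out = holl_alt answers
instance (answers : List Int) (out : String) : Decidable (Spec_holl answers out) := by unfold Spec_holl; infer_instance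

-- ===== CLAIM (what is proved, stated in full; the proofs are below) =====
def Claim_equal_holl : Prop := ∀ (answers : List Int), Dom_holl answers → Spec_holl answers (holl answers)

-- ===== LEMMAS AND PROOFS =====
-- proof-side names for B's inverse index, initial dict and scatter step (definitionally B's)
def sLook : PySem.Dict Int String :=
  hollSubScales.foldl (fun d p => p.2.foldl (fun d q => d.insert q p.1) d) PySem.Dict.empty
def sInit : PySem.Dict String Int :=
  (hollSubScales.foldl (fun d p => d.insert p.1 0) PySem.Dict.empty).insert "Интеграционный уровень" 0
def sStep (d : PySem.Dict String Int) (iv : Int × Int) : PySem.Dict String Int :=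
  (d.modify (sLook.getD (iv.1 + 1) "") 0 (· + iv.2)).modify "Интеграционный уровень" 0 (· + iv.2)

-- one scatter step never changes the key list when both touched keys are present
theorem keys_sStep (d : PySem.Dict String Int) (iv : Int × Int)
    (h1 : d.contains (sLook.getD (iv.1 + 1) "") = true)
    (h2 : d.contains "Интеграционный уровень" = true) :
    (sStep d iv).keys = d.keys := by
  unfold sStep
  rw [PySem.Dict.keys_modify, PySem.Dict.keys_insert_of_contains _ _ (by
      simp [PySem.Dict.contains_modify, h2]),
    PySem.Dict.keys_modify, PySem.Dict.keys_insert_of_contains _ _ h1]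

theorem contains_sStep (d : PySem.Dict String Int) (iv : Int × Int) (k : String)
    (h : d.contains k = true) : (sStep d iv).contains k = true := by
  simp [sStep, PySem.Dict.contains_modify, h]

theorem keys_foldl_sStep (l : List (Int × Int)) (d : PySem.Dict String Int)
    (hl : ∀ iv ∈ l, d.contains (sLook.getD (iv.1 + 1) "") = true)
    (h2 : d.contains "Интеграционный уровень" = true) :
    (l.foldl sStep d).keys = d.keys := by
  induction l generalizing d with
  | nil => rfl
  | cons iv l ih =>
      rw [List.foldl_cons,
        ih (sStep d iv) (fun iv' h' => contains_sStep _ _ _ (hl iv' (List.mem_cons_of_mem _ h')))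
          (contains_sStep _ _ _ h2),
        keys_sStep d iv (hl iv (List.mem_cons_self)) h2]

-- value accumulated at key k by the scatter pass: the answers routed to k, plus (for the
-- integration key) the total of all answers
theorem getD_foldl_sStep (l : List (Int × Int)) (d : PySem.Dict String Int) (k : String) :
    (l.foldl sStep d).getD k 0 =
      d.getD k 0 + ((l.filter (fun iv => sLook.getD (iv.1 + 1) "" == k)).map (·.2)).sum
        + (if k = "Интеграционный уровень" then (l.map (·.2)).sum else 0) := by
  induction l generalizing d with
  | nil => simp
  | cons iv l ih =>
      rw [List.foldl_cons, ih (sStep d iv)]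
      simp only [sStep, PySem.Dict.getD_modify, List.filter_cons, List.map_cons, List.sum_cons,
        beq_iff_eq]
      rcases eq_or_ne k "Интеграционный уровень" with hI | hI
      · subst hI
        rcases eq_or_ne (sLook.getD (iv.1 + 1) "") "Интеграционный уровень" with hk | hk
        · simp [hk]; ring
        · simp [hk, Ne.symm hk]; ring
      · rcases eq_or_ne (sLook.getD (iv.1 + 1) "") k with hk | hk
        · subst hk
          simp [hI]; ring
        · simp [hI, hk, Ne.symm hk]

-- a dict with distinct keys is its key list paired with its values
theorem items_eq_keys_map (d : PySem.Dict String Int) (h : d.keys.Nodup) :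
    d.items = d.keys.map (fun k => (k, d.getD k 0)) := by
  apply List.ext_getElem
  · simp [PySem.Dict.keys]
  · intro i h1 h2
    simp only [PySem.Dict.keys, List.getElem_map]
    have hm : d.items[i] ∈ d.items := List.getElem_mem _
    exact Prod.ext rfl ((PySem.Dict.getD_of_mem_items d (by simpa using hm) h 0).symm)

-- the routed-sum over enumerate(answers) is A's gather-sum over the corresponding indices
theorem scatter_sum (answers : List Int) (h : answers.length = 30) (k : String) (idxs : List Int)
    (hfil : (PySem.List.pyRange 0 30 1).filter (fun j => sLook.getD (j + 1) "" == k) = idxs) :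
    (((PySem.List.enumerate answers).filter (fun iv => sLook.getD (iv.1 + 1) "" == k)).map (·.2)).sum
      = (idxs.map (fun j => PySem.List.pyGetD answers j 0)).sum := by
  have hlen : PySem.List.len answers = 30 := by simp [PySem.List.len, h]
  rw [PySem.List.enumerate_eq_map_pyRange answers 0, hlen, List.filter_map, List.map_map]
  have hcomp : ((fun iv : Int × Int => sLook.getD (iv.1 + 1) "" == k) ∘
      (fun j => (j, PySem.List.pyGetD answers j 0))) = (fun j => sLook.getD (j + 1) "" == k) := rfl
  rw [hcomp, hfil]
  rfl

theorem holl_guard_cases (answers : List Int) :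
    holl answers = holl_alt answers := by
  by_cases hg : answers.length ≠ 30 ∨ answers.any (fun response => !(([-3, -2, -1, 1, 2, 3] : List Int).contains response)) = true
  · unfold holl holl_alt
    rw [if_pos hg, if_pos hg]
  · have h : answers.length = 30 := by
      push_neg at hg; exact hg.1
    unfold holl holl_alt
    rw [if_neg hg, if_neg hg]
    show hollRender _ = hollRender ((PySem.List.enumerate answers).foldl sStep sInit).items
    have hcont : ∀ iv ∈ PySem.List.enumerate answers,
        sInit.contains (sLook.getD (iv.1 + 1) "") = true := by
      intro iv hiv
      rcases (PySem.List.mem_enumerate_iff _ _ _).1 hiv with ⟨j, hj, rfl⟩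
      have hall : ∀ x ∈ PySem.List.pyRange 0 30 1, sInit.contains (sLook.getD (x + 1) "") = true := by
        decide
      have : ((0 : Int) + j) ∈ PySem.List.pyRange 0 30 1 := by
        rw [PySem.List.mem_pyRange_one]
        constructor <;> [omega; (push_cast; omega)]
      simpa using hall _ this
    have hkeys : ((PySem.List.enumerate answers).foldl sStep sInit).keys = sInit.keys :=
      keys_foldl_sStep _ _ hcont (by decide)
    rw [items_eq_keys_map _ (by rw [hkeys]; decide), hkeys,
      (by decide : sInit.keys = ["Эмоциональная осведомленность", "Управление своими эмоциями",
        "Самомотивация", "Эмпатия", "Распознавание эмоций других людей", "Интеграционный уровень"])]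
    refine congrArg hollRender ?_
    simp only [hollSubScales, List.map_cons, List.map_nil, List.cons_append, List.nil_append,
      getD_foldl_sStep, List.cons.injEq, Prod.mk.injEq]
    refine ⟨⟨trivial, ?_⟩, ⟨trivial, ?_⟩, ⟨trivial, ?_⟩, ⟨trivial, ?_⟩, ⟨trivial, ?_⟩, ⟨trivial, ?_⟩, trivial⟩
    · rw [scatter_sum answers h "Эмоциональная осведомленность" ([0, 1, 3, 16, 18, 24] : List Int) (by decide),
        (by decide : sInit.getD "Эмоциональная осведомленность" 0 = 0)]
      simp [PySem.List.pyGetD, PySem.List.pyGet?]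
      try norm_num
    · rw [scatter_sum answers h "Управление своими эмоциями" ([2, 6, 7, 9, 17, 29] : List Int) (by decide),
        (by decide : sInit.getD "Управление своими эмоциями" 0 = 0)]
      simp [PySem.List.pyGetD, PySem.List.pyGet?]
      try norm_num
    · rw [scatter_sum answers h "Самомотивация" ([4, 5, 12, 13, 15, 21] : List Int) (by decide),
        (by decide : sInit.getD "Самомотивация" 0 = 0)]
      simp [PySem.List.pyGetD, PySem.List.pyGet?]
      try norm_num
    · rw [scatter_sum answers h "Эмпатия" ([8, 10, 19, 20, 22, 27] : List Int) (by decide),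
        (by decide : sInit.getD "Эмпатия" 0 = 0)]
      simp [PySem.List.pyGetD, PySem.List.pyGet?]
      try norm_num
    · rw [scatter_sum answers h "Распознавание эмоций других людей" ([11, 14, 23, 25, 26, 28] : List Int) (by decide),
        (by decide : sInit.getD "Распознавание эмоций других людей" 0 = 0)]
      simp [PySem.List.pyGetD, PySem.List.pyGet?]
      try norm_num
    · rw [scatter_sum answers h "Интеграционный уровень" ([] : List Int) (by decide),
        (by decide : sInit.getD "Интеграционный уровень" 0 = 0), PySem.List.map_snd_enumerate]
      simp

-- ===== VERDICT (by name: the statement is the Claim_ definition above) =====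
theorem holl_spec : Claim_equal_holl := by
  intro answers _
  unfold Spec_holl
  exact holl_guard_cases answers
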